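-- pv_equiv track=rewrite | github.com/xiuyilou/dts-offline | decoding_tree_sketching/utils/eval_utils.py | extract_all_boxed_content
-- ===== SOURCE A (Python) =====
-- def extract_all_boxed_content(text):
--     results = []
--     start = 0
--
--     while True:
--         # Find the next occurrence of \boxed{
--         start = text.find(r"\boxed{", start)
--         if start == -1:
--             break  # No more \boxed{ found
--
--         brace_count = 0
--         result = []
--         i = start
--
--         while i < len(text):
--             char = text[i]
--             result.append(char)
--
--             if char == '{':
--                 brace_count += 1
--             elif char == '}':
--                 brace_count -= 1
--
--             # Stop when the braces are balanced
--             if brace_count == 0 and result[-1] == '}':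
--                 break
--
--             i += 1
--
--         # Append the matched content
--         results.append(''.join(result))
--         start = i + 1  # Move past the current match to find the next
--
--     return results
-- ===== SOURCE B (Python) =====
-- def extract_all_boxed_content(text):
--     # Single left-to-right sweep: test for the marker at each position instead of
--     # repeated str.find, locate the matching brace with an arithmetic depth scan
--     # (no character accumulation), and emit each match as one slice of text.
--     n = len(text)
--     out = []
--     i = 0
--     while i < n:
--         if text.startswith("\\boxed{", i):
--             depth = 1
--             j = i + 7
--             while j < n:
--                 c = text[j]
--                 if c == '{':
--                     depth += 1
--                 elif c == '}':
--                     depth -= 1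
--                     if depth == 0:
--                         break
--                 j += 1
--             if j < n:
--                 out.append(text[i:j + 1])
--                 i = j + 1
--             else:
--                 out.append(text[i:])
--                 i = n
--         else:
--             i += 1
--     return out
-- ===== Notes on version B (the rewrite author's own statement) =====
-- stated objective: alternative
-- what changed: Replaces the find-driven loop that rebuilds each match character by character (append+join) with a single left-to-right index sweep that tests the marker at each position, locates the matching brace with a pure depth counter, and emits each match as one slice.
import Mathlib
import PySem

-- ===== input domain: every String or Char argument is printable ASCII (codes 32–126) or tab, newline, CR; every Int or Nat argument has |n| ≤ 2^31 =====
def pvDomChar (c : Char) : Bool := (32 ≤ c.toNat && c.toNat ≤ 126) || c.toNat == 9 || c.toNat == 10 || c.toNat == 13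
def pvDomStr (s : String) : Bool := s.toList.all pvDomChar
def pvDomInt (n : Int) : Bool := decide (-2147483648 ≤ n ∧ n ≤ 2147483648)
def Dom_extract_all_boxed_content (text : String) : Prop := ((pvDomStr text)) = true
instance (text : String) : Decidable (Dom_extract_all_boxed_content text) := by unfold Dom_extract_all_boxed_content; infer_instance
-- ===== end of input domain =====

-- B replaces A's find-driven loop that rebuilds each match char-by-char (append+join)
-- with a single index sweep testing the marker at each position, an arithmetic
-- depth counter for the matching brace, and one slice per match (alternative, not faster).
-- The fuel parameters below only make the Python while-loops total; each call site
-- passes enough fuel for every iteration the Python loop performs.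

-- the literal marker r"\boxed{" as a character list
def pvBox : List Char := ['\\', 'b', 'o', 'x', 'e', 'd', '{']

-- ===== PORT A =====
-- inner while loop of A: index i, brace_count, accumulated result chars.
-- Python's break test 'brace_count == 0 and result[-1] == '}'' reads result[-1],
-- which is exactly the character c just appended, so it is ported as c = '}'.
-- The loop runs while i < len(text), so cs.length fuel is always enough.
def pv_ainner (cs : List Char) (fuel i : Nat) (bc : Int) (res : List Char) : List Char × Nat :=
  match fuel with
  | 0 => (res, i)
  | fuel + 1 =>
    if h : i < cs.length then
      let c := cs[i]
      let res' := res ++ [c]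
      let bc' := if c = '{' then bc + 1 else if c = '}' then bc - 1 else bc
      if bc' = 0 ∧ c = '}' then (res', i)
      else pv_ainner cs fuel (i + 1) bc' res'
    else (res, i)

-- outer while-True loop of A: find the next occurrence, scan to rebalance, append,
-- advance.  start strictly increases and the loop ends once start > len(text),
-- so cs.length + 2 fuel is always enough.
def pv_aouter (cs : List Char) (fuel : Nat) (start : Nat) (results : List String) : List String :=
  match fuel with
  | 0 => results
  | fuel + 1 =>
    let f := PySem.Chars.findFrom cs pvBox (start : Int)
    if f = -1 then results
    else
      let r := pv_ainner cs cs.length f.toNat 0 []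
      pv_aouter cs fuel (r.2 + 1) (results ++ [String.ofList r.1])

def extract_all_boxed_content (text : String) : List String :=
  pv_aouter text.toList (text.toList.length + 2) 0 []

-- ===== PORT B =====
-- B's inner loop: pure depth counter from position j, returns the index of the
-- matching '}' (or cs.length when the scan runs off the end); runs while j < len
def pv_bclose (cs : List Char) (fuel j : Nat) (depth : Int) : Nat :=
  match fuel with
  | 0 => j
  | fuel + 1 =>
    if h : j < cs.length then
      let c := cs[j]
      if c = '{' then pv_bclose cs fuel (j + 1) (depth + 1)
      else if c = '}' then
        (if depth - 1 = 0 then j else pv_bclose cs fuel (j + 1) (depth - 1))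
      else pv_bclose cs fuel (j + 1) depth
    else j

-- B's outer sweep: text.startswith("\boxed{", i) is ported as startswith on cs.drop i
-- (exact for 0 ≤ i); text[i:j+1] and text[i:] are PySem slices; i increases every
-- iteration and the loop runs while i < len, so cs.length fuel is always enough
def pv_bgo (cs : List Char) (fuel : Nat) (i : Nat) (out : List String) : List String :=
  match fuel with
  | 0 => out
  | fuel + 1 =>
    if h : i < cs.length then
      if PySem.Chars.startswith (cs.drop i) pvBox then
        let j := pv_bclose cs cs.length (i + 7) 1
        if j < cs.length then
          pv_bgo cs fuel (j + 1)
            (out ++ [String.ofList (PySem.List.slice cs (some (i : Int)) (some ((j : Int) + 1)))])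
        else out ++ [String.ofList (PySem.List.slice cs (some (i : Int)) none)]
      else pv_bgo cs fuel (i + 1) out
    else out

def extract_all_boxed_content_alt (text : String) : List String :=
  pv_bgo text.toList text.toList.length 0 []

-- ===== PRECONDITION & SPEC =====
def Spec_extract_all_boxed_content (text : String) (out : List String) : Prop := out = extract_all_boxed_content_alt text
instance (text : String) (out : List String) : Decidable (Spec_extract_all_boxed_content text out) := by unfold Spec_extract_all_boxed_content; infer_instance

-- ===== CLAIM (what is proved, stated in full; the proofs are below) =====
def Claim_equal_extract_all_boxed_content : Prop := ∀ (text : String), Dom_extract_all_boxed_content text → Spec_extract_all_boxed_content text (extract_all_boxed_content text)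

-- ===== LEMMAS AND PROOFS =====

-- find from a start past the end is -1
theorem pv_findFrom_gt (s sub : List Char) (k : Nat) (h : s.length < k) :
    PySem.Chars.findFrom s sub (k : Int) = -1 := by
  unfold PySem.Chars.findFrom
  have h1 : ¬ ((k : Int) < 0) := by omega
  simp only [h1, if_false]
  rw [if_pos (by exact_mod_cast h)]

theorem pv_bclose_ge (cs : List Char) (fuel j : Nat) (depth : Int) :
    j ≤ pv_bclose cs fuel j depth := by
  fun_induction pv_bclose <;> (try simp) <;> omega

theorem pv_bclose_le (cs : List Char) (fuel j : Nat) (depth : Int) (h : j ≤ cs.length) :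
    pv_bclose cs fuel j depth ≤ cs.length := by
  fun_induction pv_bclose <;> (try omega) <;> (rename_i ih; exact ih (by omega))

-- A's rebalance scan from q with positive depth = res ++ the slice up to B's close index
theorem pv_inner_eq (cs : List Char) :
    ∀ (fa fb q : Nat) (depth : Int) (res : List Char),
      cs.length - q ≤ fa → cs.length - q ≤ fb → 1 ≤ depth →
      pv_ainner cs fa q depth res =
        (res ++ (cs.drop q).take (pv_bclose cs fb q depth + 1 - q), pv_bclose cs fb q depth) := by
  intro fa
  induction fa with
  | zero =>
    intro fb q depth res hfa hfb hd
    have hq : ¬ q < cs.length := by omega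
    have hdr : cs.drop q = [] := List.drop_eq_nil_of_le (by omega)
    have hb : pv_bclose cs fb q depth = q := by
      cases fb with
      | zero => rfl
      | succ fb => rw [pv_bclose, dif_neg hq]
    rw [pv_ainner, hb]
    simp [hdr]
  | succ fa ih =>
    intro fb q depth res hfa hfb hd
    by_cases hq : q < cs.length
    · obtain ⟨fb, rfl⟩ : ∃ fb', fb = fb' + 1 := ⟨fb - 1, by omega⟩
      have hdrop : cs.drop q = cs[q] :: cs.drop (q + 1) :=
        List.drop_eq_getElem_cons hq
      by_cases h1 : cs[q] = '{'
      · have hb : pv_bclose cs (fb + 1) q depth = pv_bclose cs fb (q + 1) (depth + 1) := by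
          rw [pv_bclose, dif_pos hq]; simp [h1]
        rw [pv_ainner, dif_pos hq]
        simp only [h1]
        rw [if_neg (by simp)]
        rw [if_pos trivial]
        rw [ih fb (q + 1) (depth + 1) _ (by omega) (by omega) (by omega)]
        rw [hb]
        have hge := pv_bclose_ge cs fb (q + 1) (depth + 1)
        set b := pv_bclose cs fb (q + 1) (depth + 1) with hbdef
        have ht : b + 1 - q = (b + 1 - (q + 1)) + 1 := by omega
        rw [ht, hdrop, List.take_succ_cons, h1]
        simp
      · by_cases h2 : cs[q] = '}'
        · by_cases hd1 : depth = 1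
          · subst hd1
            rw [pv_ainner, dif_pos hq]
            simp only [h1, h2]
            rw [if_pos (by simp)]
            have hb : pv_bclose cs (fb + 1) q 1 = q := by
              rw [pv_bclose, dif_pos hq]; simp [h1, h2]
            rw [hb]
            have ht : q + 1 - q = 1 := by omega
            rw [ht, hdrop, List.take_succ_cons, List.take_zero, h2]
          · have hb : pv_bclose cs (fb + 1) q depth = pv_bclose cs fb (q + 1) (depth - 1) := by
              rw [pv_bclose, dif_pos hq]
              simp [h2, show ¬ (depth - 1 = 0) from by omega]
            rw [pv_ainner, dif_pos hq]
            simp only [h1, h2]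
            rw [if_neg (by simp; omega)]
            rw [if_neg (by decide), if_pos trivial]
            rw [ih fb (q + 1) (depth - 1) _ (by omega) (by omega) (by omega)]
            rw [hb]
            have hge := pv_bclose_ge cs fb (q + 1) (depth - 1)
            set b := pv_bclose cs fb (q + 1) (depth - 1) with hbdef
            have ht : b + 1 - q = (b + 1 - (q + 1)) + 1 := by omega
            rw [ht, hdrop, List.take_succ_cons, h2]
            simp
        · have hb : pv_bclose cs (fb + 1) q depth = pv_bclose cs fb (q + 1) depth := by
            rw [pv_bclose, dif_pos hq]; simp [h1, h2]
          rw [pv_ainner, dif_pos hq]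
          simp only [h1, h2]
          rw [if_neg (by simp [h2])]
          rw [if_neg (by trivial), if_neg (by trivial)]
          rw [ih fb (q + 1) depth _ (by omega) (by omega) hd]
          rw [hb]
          have hge := pv_bclose_ge cs fb (q + 1) depth
          set b := pv_bclose cs fb (q + 1) depth with hbdef
          have ht : b + 1 - q = (b + 1 - (q + 1)) + 1 := by omega
          rw [ht, hdrop, List.take_succ_cons]
          simp
    · have hdr : cs.drop q = [] := List.drop_eq_nil_of_le (by omega)
      have hb : pv_bclose cs fb q depth = q := by
        cases fb with
        | zero => rfl
        | succ fb => rw [pv_bclose, dif_neg hq]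
      rw [pv_ainner, dif_neg hq, hb]
      simp [hdr]

-- one step of A's scan over a non-breaking character
theorem pv_ainner_step (cs : List Char) (fuel q : Nat) (c : Char) (rest : List Char)
    (h : cs.drop q = c :: rest) (bc : Int) (res : List Char) (hne : c ≠ '}') :
    pv_ainner cs (fuel + 1) q bc res =
      pv_ainner cs fuel (q + 1) (if c = '{' then bc + 1 else if c = '}' then bc - 1 else bc)
        (res ++ [c]) := by
  have hq : q < cs.length := by
    by_contra hc
    rw [List.drop_eq_nil_of_le (by omega)] at h
    simp at h
  have hcq : cs[q] = c := by
    have h3 := List.drop_eq_getElem_cons hq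
    rw [h] at h3
    exact (List.cons_eq_cons.mp h3.symm).1
  rw [pv_ainner, dif_pos hq]
  simp only [hcq]
  rw [if_neg (by rintro ⟨_, hc⟩; exact hne hc)]

-- A's scan from an occurrence of the marker = scan from past the marker with depth 1
theorem pv_seven (cs : List Char) (fl p : Nat) (rest : List Char)
    (hp : cs.drop p = pvBox ++ rest) (hfl : 7 ≤ fl) :
    pv_ainner cs fl p 0 [] = pv_ainner cs (fl - 7) (p + 7) 1 pvBox := by
  obtain ⟨f, rfl⟩ : ∃ f, fl = f + 7 := ⟨fl - 7, by omega⟩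
  have d1 : cs.drop (p + 1) = ['b', 'o', 'x', 'e', 'd', '{'] ++ rest := by
    rw [← List.drop_drop, hp]; rfl
  have d2 : cs.drop (p + 2) = ['o', 'x', 'e', 'd', '{'] ++ rest := by
    rw [show p + 2 = (p + 1) + 1 from by omega, ← List.drop_drop, d1]; rfl
  have d3 : cs.drop (p + 3) = ['x', 'e', 'd', '{'] ++ rest := by
    rw [show p + 3 = (p + 2) + 1 from by omega, ← List.drop_drop, d2]; rfl
  have d4 : cs.drop (p + 4) = ['e', 'd', '{'] ++ rest := by
    rw [show p + 4 = (p + 3) + 1 from by omega, ← List.drop_drop, d3]; rfl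
  have d5 : cs.drop (p + 5) = ['d', '{'] ++ rest := by
    rw [show p + 5 = (p + 4) + 1 from by omega, ← List.drop_drop, d4]; rfl
  have d6 : cs.drop (p + 6) = ['{'] ++ rest := by
    rw [show p + 6 = (p + 5) + 1 from by omega, ← List.drop_drop, d5]; rfl
  rw [show f + 7 = (f + 6) + 1 from by omega,
    pv_ainner_step cs (f + 6) p '\\' _ (by simpa [pvBox] using hp) 0 [] (by decide)]
  rw [show f + 6 = (f + 5) + 1 from by omega,
    pv_ainner_step cs (f + 5) (p + 1) 'b' _ (by simpa using d1) _ _ (by decide)]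
  rw [show f + 5 = (f + 4) + 1 from by omega,
    pv_ainner_step cs (f + 4) (p + 2) 'o' _ (by simpa using d2) _ _ (by decide)]
  rw [show f + 4 = (f + 3) + 1 from by omega,
    pv_ainner_step cs (f + 3) (p + 3) 'x' _ (by simpa using d3) _ _ (by decide)]
  rw [show f + 3 = (f + 2) + 1 from by omega,
    pv_ainner_step cs (f + 2) (p + 4) 'e' _ (by simpa using d4) _ _ (by decide)]
  rw [show f + 2 = (f + 1) + 1 from by omega,
    pv_ainner_step cs (f + 1) (p + 5) 'd' _ (by simpa using d5) _ _ (by decide)]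
  rw [pv_ainner_step cs f (p + 6) '{' _ (by simpa using d6) _ _ (by decide)]
  norm_num
  rfl

-- B's sweep returns the accumulator unchanged when no marker occurs at or after start
theorem pv_bgo_none (cs : List Char) :
    ∀ (fuel start : Nat) (acc : List String),
      (∀ i, start ≤ i → ¬ pvBox <+: cs.drop i) →
      pv_bgo cs fuel start acc = acc := by
  intro fuel
  induction fuel with
  | zero => intro start acc hall; rfl
  | succ fuel ih =>
    intro start acc hall
    by_cases hq : start < cs.length
    · rw [pv_bgo, dif_pos hq]
      have hsw : PySem.Chars.startswith (cs.drop start) pvBox = false := by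
        rw [Bool.eq_false_iff]
        intro hc
        exact hall start le_rfl ((PySem.Chars.startswith_iff _ _).mp hc)
      rw [if_neg (by simp [hsw])]
      exact ih (start + 1) acc (fun i hi => hall i (by omega))
    · rw [pv_bgo, dif_neg hq]

-- B's sweep skips positions where the marker does not occur
theorem pv_bgo_skip (cs : List Char) :
    ∀ (k fuel start : Nat) (acc : List String), start + k ≤ cs.length → k ≤ fuel →
      (∀ i, start ≤ i → i < start + k → ¬ pvBox <+: cs.drop i) →
      pv_bgo cs fuel start acc = pv_bgo cs (fuel - k) (start + k) acc := by
  intro k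
  induction k with
  | zero => intro fuel start acc _ _ _; rfl
  | succ k ih =>
    intro fuel start acc hle hkf hall
    obtain ⟨fuel, rfl⟩ : ∃ f, fuel = f + 1 := ⟨fuel - 1, by omega⟩
    have hq : start < cs.length := by omega
    rw [pv_bgo, dif_pos hq]
    have hsw : PySem.Chars.startswith (cs.drop start) pvBox = false := by
      rw [Bool.eq_false_iff]
      intro hc
      exact hall start le_rfl (by omega) ((PySem.Chars.startswith_iff _ _).mp hc)
    rw [if_neg (by simp [hsw])]
    rw [ih fuel (start + 1) acc (by omega) (by omega)
      (fun i hi hi2 => hall i (by omega) (by omega))]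
    congr 1
    · omega
    · omega

-- the main loop equivalence
theorem pv_main (cs : List Char) :
    ∀ (fa fb start : Nat) (acc : List String),
      cs.length + 1 - start ≤ fa → cs.length - start ≤ fb → start ≤ cs.length →
      pv_aouter cs fa start acc = pv_bgo cs fb start acc := by
  intro fa
  induction fa with
  | zero => intro fb start acc hfa hfb hs; omega
  | succ fa ih =>
    intro fb start acc hfa hfb hs
    by_cases hf : PySem.Chars.findFrom cs pvBox (start : Int) = -1
    · rw [pv_aouter]
      simp only [hf, if_pos rfl]
      have hninf : ¬ pvBox <:+: cs.drop start :=
        (PySem.Chars.findFrom_natCast_eq_neg_one_iff cs pvBox start hs).mp hf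
      refine (pv_bgo_none cs fb start acc ?_).symm
      intro i hi hpre
      apply hninf
      have hdi : cs.drop i = (cs.drop start).drop (i - start) := by
        rw [List.drop_drop]; congr 1; omega
      rw [hdi] at hpre
      exact hpre.isInfix.trans (List.drop_suffix _ _).isInfix
    · obtain ⟨hkf, hpre, hmin⟩ := PySem.Chars.findFrom_natCast_spec cs pvBox start hs hf
      have hf0 : 0 ≤ PySem.Chars.findFrom cs pvBox (start : Int) :=
        le_trans (Int.natCast_nonneg start) hkf
      obtain ⟨p, hpdef⟩ : ∃ p : Nat, (PySem.Chars.findFrom cs pvBox (start : Int)).toNat = p :=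
        ⟨_, rfl⟩
      rw [hpdef] at hpre hmin
      have hsp : start ≤ p := by omega
      obtain ⟨rest0, hrest0⟩ := hpre
      have hrest : cs.drop p = pvBox ++ rest0 := hrest0.symm
      have hple : p ≤ cs.length := by
        by_contra hc
        rw [List.drop_eq_nil_of_le (by omega)] at hrest
        simp [pvBox] at hrest
      have hplen : p + 7 ≤ cs.length := by
        have h7 := congrArg List.length hrest
        rw [List.length_drop, List.length_append] at h7
        simp [pvBox] at h7
        omega
      have hrest7 : rest0 = cs.drop (p + 7) := by
        have hdd : cs.drop (p + 7) = (cs.drop p).drop 7 := by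
          rw [List.drop_drop]
        rw [hdd, hrest]
        simp [pvBox]
      have hjge : p + 7 ≤ pv_bclose cs cs.length (p + 7) 1 :=
        pv_bclose_ge cs cs.length (p + 7) 1
      have hjle : pv_bclose cs cs.length (p + 7) 1 ≤ cs.length :=
        pv_bclose_le cs cs.length (p + 7) 1 hplen
      obtain ⟨j, hjdef⟩ : ∃ j : Nat, pv_bclose cs cs.length (p + 7) 1 = j := ⟨_, rfl⟩
      rw [hjdef] at hjge hjle
      -- A side: one iteration of the outer loop
      rw [pv_aouter]
      simp only [hf, if_neg hf, hpdef]
      rw [pv_seven cs cs.length p rest0 hrest (by omega)]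
      rw [pv_inner_eq cs (cs.length - 7) cs.length (p + 7) 1 pvBox (by omega) (by omega) le_rfl]
      rw [hjdef]
      -- B side: skip the non-matching positions, then one marker step
      rw [pv_bgo_skip cs (p - start) fb start acc (by omega) (by omega)
        (fun i hi hi2 => hmin i hi (by omega))]
      rw [show start + (p - start) = p from by omega]
      obtain ⟨fb', hfb'⟩ : ∃ f, fb - (p - start) = f + 1 := ⟨fb - (p - start) - 1, by omega⟩
      rw [hfb', pv_bgo, dif_pos (by omega)]
      rw [if_pos ((PySem.Chars.startswith_iff _ _).mpr ⟨rest0, hrest0⟩)]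
      rw [hjdef]
      by_cases hjn : j < cs.length
      · rw [if_pos hjn]
        have hslice : PySem.List.slice cs (some (p : Int)) (some ((j : Int) + 1)) =
            pvBox ++ (cs.drop (p + 7)).take (j + 1 - (p + 7)) := by
          rw [show ((j : Int) + 1) = ((j + 1 : Nat) : Int) from by push_cast; ring]
          rw [PySem.List.slice_natCast]
          rw [hrest, hrest7]
          rw [show j + 1 - p = pvBox.length + (j + 1 - (p + 7)) from by simp [pvBox]; omega]
          rw [List.take_append]
          simp [pvBox]
          rw [List.take_of_length_le (by simp)]
          rfl
        rw [hslice]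
        exact ih fb' (j + 1) _ (by omega) (by omega) (by omega)
      · rw [if_neg hjn]
        have hj : j = cs.length := by omega
        obtain ⟨fa', rfl⟩ : ∃ f, fa = f + 1 := ⟨fa - 1, by omega⟩
        rw [pv_aouter]
        rw [if_pos (pv_findFrom_gt cs pvBox (j + 1) (by omega))]
        have htake : (cs.drop (p + 7)).take (j + 1 - (p + 7)) = cs.drop (p + 7) := by
          apply List.take_of_length_le
          rw [List.length_drop]
          omega
        have hslice : PySem.List.slice cs (some (p : Int)) none = pvBox ++ cs.drop (p + 7) := by
          rw [PySem.List.slice_from_natCast, hrest, hrest7]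
        rw [htake, hslice]
        simp

-- ===== VERDICT (by name: the statement is the Claim_ definition above) =====
theorem extract_all_boxed_content_spec : Claim_equal_extract_all_boxed_content := by
  intro text _
  unfold Spec_extract_all_boxed_content extract_all_boxed_content extract_all_boxed_content_alt
  exact pv_main text.toList (text.toList.length + 2) text.toList.length 0 [] (by omega) (by omega) (by omega)
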